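-- pv_equiv track=rewrite | github.com/M-G-Sabbagh/Data-Networks | HW4-Part2/DN_HW4_2.py | deterministic_batch
-- ===== SOURCE A (Python) =====
-- def deterministic_batch(start, T, L):
--     """
--
--     Parameters
--     ----------
--     start :
--         Arrival time of first packet
--     T :
--         1/4 of inter-arrival time in milisecons
--     L :
--         Number of packets (L must be a multiple of 4)
--
--     Returns
--     -------
--     AP2 : Arrival times vector
--
--
--     """
--
--     if L % 4 == 0:
--
--         AP2 = [0] * L
--
--         for i in range (L // 4):
--
--             if i == 0:
--
--                 for j in range(4):
--                     AP2[j] = start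
--
--             if i > 0:
--
--                 for j in range (4):
--                     AP2[4 * i + j] = AP2[4 * (i - 1) + j] + 4 * T
--         return AP2
--     else:
--         return("Error: Number of packets must be a multiple of 4")
-- ===== SOURCE B (Python) =====
-- def deterministic_batch(start, T, L):
--     if L % 4 == 0:
--         return [start + 4 * T * i for i in range(L // 4) for _ in range(4)]
--     else:
--         return "Error: Number of packets must be a multiple of 4"
-- ===== Notes on version B (the rewrite author's own statement) =====
-- stated objective: simpler
-- what changed: Replaces the preallocated [0]*L buffer, the i==0/i>0 special cases and the inter-block recurrence AP2[4i+j] = AP2[4(i-1)+j] + 4T by the closed form start + 4*T*i, emitted as a single flat comprehension.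
import Mathlib
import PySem

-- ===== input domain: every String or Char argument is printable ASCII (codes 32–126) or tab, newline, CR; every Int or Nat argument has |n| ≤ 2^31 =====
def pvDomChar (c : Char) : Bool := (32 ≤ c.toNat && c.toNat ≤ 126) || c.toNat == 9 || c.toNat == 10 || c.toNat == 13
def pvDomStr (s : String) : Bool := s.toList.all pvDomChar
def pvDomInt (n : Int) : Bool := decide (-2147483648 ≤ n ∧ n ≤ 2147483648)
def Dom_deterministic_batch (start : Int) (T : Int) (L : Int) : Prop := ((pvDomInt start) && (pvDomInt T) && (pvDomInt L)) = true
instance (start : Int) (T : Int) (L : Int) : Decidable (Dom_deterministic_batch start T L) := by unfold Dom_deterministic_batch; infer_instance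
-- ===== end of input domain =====

-- B replaces A's zero-filled buffer, i==0/i>0 cases and inter-block recurrence by the closed
-- form start + 4*T*i emitted by a flat comprehension (objective: simpler).


-- ===== PORT A =====
-- Body of A's outer 'for i in range(L // 4)' loop, extracted as a named helper.
-- The reads AP2[4*(i-1)+j] are always in range when the loop runs (4*i+3 < L), so getD 0 is exact.
def detBodyA (start : Int) (T : Int) (ap : List Int) (i : Int) : List Int :=
  let ap1 := if i == 0 then
      (PySem.List.pyRange 0 4 1).foldl (fun a j => a.set j.toNat start) ap
    else ap
  if 0 < i then
    (PySem.List.pyRange 0 4 1).foldl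
      (fun a j => a.set (4 * i + j).toNat (a.getD (4 * (i - 1) + j).toNat 0 + 4 * T)) ap1
  else ap1

def deterministic_batch (start : Int) (T : Int) (L : Int) : List Int :=
  if PySem.Int.mod L 4 == 0 then
    -- AP2 = [0] * L  ([] for L ≤ 0, as in Python)
    (PySem.List.pyRange 0 (PySem.Int.floordiv L 4) 1).foldl (detBodyA start T)
      (List.replicate L.toNat 0)
  else []  -- Python returns the error STRING here; excluded by Pre_

-- ===== PORT B =====
def deterministic_batch_alt (start : Int) (T : Int) (L : Int) : List Int :=
  if PySem.Int.mod L 4 == 0 then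
    (PySem.List.pyRange 0 (PySem.Int.floordiv L 4) 1).flatMap
      (fun i => (PySem.List.pyRange 0 4 1).map (fun _ => start + 4 * T * i))
  else []  -- Python returns the error STRING here; excluded by Pre_

-- ===== PRECONDITION & SPEC =====
-- Pre_ excludes L not a multiple of 4, where A returns the error STRING
-- "Error: Number of packets must be a multiple of 4" instead of a list of ints (B returns the same string).
def Pre_deterministic_batch (start : Int) (T : Int) (L : Int) : Prop := PySem.Int.mod L 4 = 0
instance (start : Int) (T : Int) (L : Int) : Decidable (Pre_deterministic_batch start T L) := by
  unfold Pre_deterministic_batch; infer_instance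

def pvWitness_deterministic_batch : Int × Int × Int := (5, 2, 8)

def Spec_deterministic_batch (start : Int) (T : Int) (L : Int) (out : List Int) : Prop :=
  out = deterministic_batch_alt start T L
instance (start : Int) (T : Int) (L : Int) (out : List Int) : Decidable (Spec_deterministic_batch start T L out) := by
  unfold Spec_deterministic_batch; infer_instance

-- ===== CLAIM (what is proved, stated in full; the proofs are below) =====
def Claim_equal_deterministic_batch : Prop := ∀ (start : Int) (T : Int) (L : Int),
  Dom_deterministic_batch start T L → Pre_deterministic_batch start T L →
  Spec_deterministic_batch start T L (deterministic_batch start T L)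

-- ===== LEMMAS AND PROOFS =====

-- the arrival times of the first k blocks (what both loops build)
def tgt (start T : Int) (k : Nat) : List Int :=
  (List.range k).flatMap (fun i : Nat => List.replicate 4 (start + 4 * T * (i : Int)))

lemma tgt_succ (start T : Int) (k : Nat) :
    tgt start T (k + 1) = tgt start T k ++ List.replicate 4 (start + 4 * T * k) := by
  simp [tgt, List.range_succ]

lemma tgt_length (start T : Int) (k : Nat) : (tgt start T k).length = 4 * k := by
  induction k with
  | zero => simp [tgt]
  | succ k ih => rw [tgt_succ]; simp [ih]; omega

lemma pyRange4 : PySem.List.pyRange 0 4 1 = [0, 1, 2, 3] := by decide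

-- the four writes of one i > 0 block of A, on a state whose next block is still zero
lemma blockA_step (T v : Int) (p r : List Int) (k : Nat) (hk : 1 ≤ k)
    (hp : p.length = 4 * (k - 1)) :
    (PySem.List.pyRange 0 4 1).foldl
      (fun a j => a.set (4 * (k : Int) + j).toNat (a.getD (4 * ((k : Int) - 1) + j).toNat 0 + 4 * T))
      (p ++ [v, v, v, v] ++ 0 :: 0 :: 0 :: 0 :: r)
    = p ++ [v, v, v, v] ++ (v + 4 * T) :: (v + 4 * T) :: (v + 4 * T) :: (v + 4 * T) :: r := by
  have hlen : (p ++ [v, v, v, v]).length = 4 * k := by simp [hp]; omega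
  have hget : ∀ (c : List Int) (j : Nat), j < 4 →
      (p ++ [v, v, v, v] ++ c).getD (4 * (k - 1) + j) 0 = v := by
    intro c j hj
    rw [List.getD_append _ _ _ _ (by simp [hp]; omega)]
    rw [show 4 * (k - 1) + j = p.length + j by omega]
    rw [List.getD_append_right _ _ _ _ (by omega)]
    simp
    interval_cases j <;> simp
  have hset : ∀ (c : List Int) (j : Nat) (w : Int),
      (p ++ [v, v, v, v] ++ c).set (4 * k + j) w = p ++ [v, v, v, v] ++ c.set j w := by
    intro c j w
    rw [List.set_append, if_neg (by rw [hlen]; omega), hlen, show 4 * k + j - 4 * k = j by omega]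
  rw [pyRange4]
  simp only [List.foldl_cons, List.foldl_nil]
  have e0 : (4 * (k : Int) + 0).toNat = 4 * k + 0 := by omega
  have e1 : (4 * (k : Int) + 1).toNat = 4 * k + 1 := by omega
  have e2 : (4 * (k : Int) + 2).toNat = 4 * k + 2 := by omega
  have e3 : (4 * (k : Int) + 3).toNat = 4 * k + 3 := by omega
  have f0 : (4 * ((k : Int) - 1) + 0).toNat = 4 * (k - 1) + 0 := by omega
  have f1 : (4 * ((k : Int) - 1) + 1).toNat = 4 * (k - 1) + 1 := by omega
  have f2 : (4 * ((k : Int) - 1) + 2).toNat = 4 * (k - 1) + 2 := by omega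
  have f3 : (4 * ((k : Int) - 1) + 3).toNat = 4 * (k - 1) + 3 := by omega
  rw [e0, f0, hget _ 0 (by omega), hset]
  rw [e1, f1, hget _ 1 (by omega), hset]
  rw [e2, f2, hget _ 2 (by omega), hset]
  rw [e3, f3, hget _ 3 (by omega), hset]
  simp [List.set]

-- loop invariant for A's outer loop: after k blocks, the first 4k slots hold the
-- arrival times and the rest are still the zeros of [0]*L
lemma loopA_inv (start T : Int) (N k : Nat) (hk : k ≤ N) :
    (List.range k).foldl (fun ap (j : Nat) => detBodyA start T ap (j : Int))
      (List.replicate (4 * N) (0 : Int))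
    = tgt start T k ++ List.replicate (4 * (N - k)) 0 := by
  induction k with
  | zero => simp [tgt]
  | succ k ih =>
    rw [List.range_succ, List.foldl_append, ih (by omega)]
    simp only [List.foldl_cons, List.foldl_nil]
    have hsplit : List.replicate (4 * (N - k)) (0 : Int)
        = 0 :: 0 :: 0 :: 0 :: List.replicate (4 * (N - (k + 1))) 0 := by
      rw [show 4 * (N - k) = 4 + 4 * (N - (k + 1)) by omega, List.replicate_add]; rfl
    rcases Nat.eq_zero_or_pos k with h0 | hpos
    · subst h0
      rw [hsplit]
      unfold detBodyA
      rw [pyRange4]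
      norm_num
      simp [List.set, tgt]
    · unfold detBodyA
      have hgt : (0 : Int) < (k : Int) := by exact_mod_cast hpos
      rw [hsplit, if_neg (show ¬(((k : Int) == 0) = true) by simp; omega), if_pos hgt]
      have hdecomp : tgt start T k
          = tgt start T (k - 1) ++ [start + 4 * T * ((k - 1 : Nat) : Int), start + 4 * T * ((k - 1 : Nat) : Int),
              start + 4 * T * ((k - 1 : Nat) : Int), start + 4 * T * ((k - 1 : Nat) : Int)] := by
        rw [show k = (k - 1) + 1 by omega, tgt_succ]
        simp [List.replicate]
      rw [hdecomp]
      rw [blockA_step T _ _ _ k hpos (by rw [tgt_length])]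
      rw [tgt_succ, hdecomp]
      have hw : start + 4 * T * ((k - 1 : Nat) : Int) + 4 * T = start + 4 * T * (k : Int) := by
        have hc : ((k - 1 : Nat) : Int) = (k : Int) - 1 := by omega
        rw [hc]; ring
      simp [List.replicate, List.append_assoc, hw]

-- B's comprehension is tgt
lemma altB_eq (start T : Int) (N : Nat) :
    (PySem.List.pyRange 0 (N : Int) 1).flatMap
      (fun i => (PySem.List.pyRange 0 4 1).map (fun _ => start + 4 * T * i))
    = tgt start T N := by
  rw [PySem.List.pyRange_zero_natCast, List.flatMap_map]
  unfold tgt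
  rfl

theorem deterministic_batch_spec : Claim_equal_deterministic_batch := by
  intro start T L _ hpre
  unfold Pre_deterministic_batch at hpre
  unfold Spec_deterministic_batch deterministic_batch deterministic_batch_alt
  rw [if_pos (by rw [hpre]; rfl), if_pos (by rw [hpre]; rfl)]
  obtain ⟨q, hq⟩ := (PySem.Int.mod_eq_zero_iff_dvd L 4).mp hpre
  have hfd : PySem.Int.floordiv L 4 = q :=
    (PySem.Int.floordiv_eq_iff_of_pos (show (0 : Int) < 4 by norm_num)).mpr ⟨by omega, by omega⟩
  rcases le_or_gt L 0 with hle | hposL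
  · have hq0 : q ≤ 0 := by omega
    rw [hfd, PySem.List.pyRange_one_eq_nil hq0]
    simp [show L.toNat = 0 by omega]
  · have hqpos : 0 < q := by omega
    set N := q.toNat with hN
    have hqN : q = (N : Int) := by omega
    have hLN : L.toNat = 4 * N := by omega
    rw [hfd, hqN, hLN, altB_eq]
    rw [PySem.List.pyRange_zero_natCast]
    rw [List.foldl_map]
    rw [loopA_inv start T N N le_rfl]
    simp
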